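-- pv_equiv track=rewrite | github.com/digitect38/XStateNet | replace_all_quotes.py | replace_double_quotes_comprehensive
-- ===== SOURCE A (Python) =====
-- def replace_double_quotes_comprehensive(content):
--     """Replace double quotes with single quotes in JSON strings more comprehensively"""
--
--     lines = content.split('\n')
--     modified_lines = []
--
--     for line in lines:
--         # Check if this line looks like it contains JSON content
--         # Look for patterns that indicate JSON in C# code
--         if any(pattern in line for pattern in ['""', '@"', 'json', 'script', 'Script', 'stateMachine']):
--             # Replace "" with ' but be careful about C# string escaping
--
--             # First handle escaped quotes in C# verbatim strings
--             line = line.replace('\\""', '__TEMP_ESCAPED__')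
--
--             # Replace double-double quotes pattern
--             line = line.replace('""', "'")
--
--             # Restore escaped quotes
--             line = line.replace('__TEMP_ESCAPED__', '\\"')
--
--         modified_lines.append(line)
--
--     return '\n'.join(modified_lines)
-- ===== SOURCE B (Python) =====
-- def replace_double_quotes_comprehensive(content):
--     """Replace double quotes with single quotes in JSON strings more comprehensively.
--
--     Single left-to-right scan per matching line: '\\""' -> '\\"' and '""' -> "'"
--     in one pass (escape takes precedence), with no placeholder round-trip.
--     """
--     out = []
--     for line in content.split('\n'):
--         if any(pattern in line for pattern in ['""', '@"', 'json', 'script', 'Script', 'stateMachine']):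
--             parts = []
--             i = 0
--             n = len(line)
--             while i < n:
--                 if line.startswith('\\""', i):
--                     parts.append('\\"')
--                     i += 3
--                 elif line.startswith('""', i):
--                     parts.append("'")
--                     i += 2
--                 else:
--                     parts.append(line[i])
--                     i += 1
--             line = ''.join(parts)
--         out.append(line)
--     return '\n'.join(out)
-- ===== Notes on version B (the rewrite author's own statement) =====
-- stated objective: alternative
-- what changed: The per-line protect/replace/restore triple (three str.replace passes through a '__TEMP_ESCAPED__' placeholder) is replaced by one left-to-right scan that rewrites '\""' to '\"' and '""' to a single quote in a single pass, with no placeholder round-trip; this also removes A's placeholder collision bug.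
-- intended difference: On guard-matching lines that contain the literal placeholder text '__TEMP_ESCAPED__' (or '__TEMP_ESCAPED'/'__TEMP_ESCAPED_' immediately followed by '\""'), A's restore pass collides with the input text and corrupts it to '\"', whereas B has no placeholder and performs only the intended quote replacements, which is the intended behaviour. — e.g. on replace_double_quotes_comprehensive("json __TEMP_ESCAPED__"): A returns "json \\\"", B returns "json __TEMP_ESCAPED__"
import Mathlib
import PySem

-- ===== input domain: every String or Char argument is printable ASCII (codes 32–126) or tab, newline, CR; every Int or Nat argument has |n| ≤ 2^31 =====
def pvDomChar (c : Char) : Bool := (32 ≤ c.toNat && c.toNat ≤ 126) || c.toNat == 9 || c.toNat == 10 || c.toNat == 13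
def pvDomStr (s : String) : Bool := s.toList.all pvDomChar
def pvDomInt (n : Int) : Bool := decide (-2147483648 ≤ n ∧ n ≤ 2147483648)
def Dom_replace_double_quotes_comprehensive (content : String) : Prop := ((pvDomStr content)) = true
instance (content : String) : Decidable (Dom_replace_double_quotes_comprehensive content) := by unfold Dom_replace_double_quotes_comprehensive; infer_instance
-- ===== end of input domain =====

-- B replaces A's three-pass placeholder round-trip by one single left-to-right scan per line
-- (escape '\""' takes precedence over '""'); B thereby has no placeholder-collision corner (see D_ below).

-- ===== PORT A =====
def pvPatterns : List String := ["\"\"", "@\"", "json", "script", "Script", "stateMachine"]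

def pvGuard (line : String) : Bool := pvPatterns.any (fun p => PySem.Str.isIn p line)

def replace_double_quotes_comprehensive (content : String) : String :=
  let lines := (PySem.Str.split? content "\n").getD []
  let modified_lines := lines.map (fun line =>
    if pvGuard line then
      let l1 := PySem.Str.replace line "\\\"\"" "__TEMP_ESCAPED__"
      let l2 := PySem.Str.replace l1 "\"\"" "'"
      PySem.Str.replace l2 "__TEMP_ESCAPED__" "\\\""
    else line)
  PySem.Str.join "\n" modified_lines

-- ===== PORT B =====
-- one pass over the characters of a line: '\""' → '\"', '""' → '\'', else copy
def pvScan : List Char → List Char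
  | '\\' :: '"' :: '"' :: rest => '\\' :: '"' :: pvScan rest
  | '"' :: '"' :: rest => '\'' :: pvScan rest
  | c :: rest => c :: pvScan rest
  | [] => []

def replace_double_quotes_comprehensive_alt (content : String) : String :=
  let lines := (PySem.Str.split? content "\n").getD []
  PySem.Str.join "\n"
    (lines.map (fun line => if pvGuard line then String.ofList (pvScan line.toList) else line))

-- ===== PRECONDITION & SPEC =====
-- On guard-matching lines containing the literal placeholder text '__TEMP_ESCAPED__' (or
-- '__TEMP_ESCAPED'/'__TEMP_ESCAPED_' immediately followed by '\""'), A's restore pass collides with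
-- the input text and corrupts it to '\"'; B has no placeholder and performs only the intended quote
-- replacements, which is the intended behaviour.
def D_replace_double_quotes_comprehensive (content : String) : Prop :=
  ∃ line ∈ (PySem.Str.split? content "\n").getD [],
    pvGuard line = true ∧
      (PySem.Str.isIn "__TEMP_ESCAPED__" line = true ∨
       PySem.Str.isIn "__TEMP_ESCAPED\\\"\"" line = true ∨
       PySem.Str.isIn "__TEMP_ESCAPED_\\\"\"" line = true)
instance (content : String) : Decidable (D_replace_double_quotes_comprehensive content) := by
  unfold D_replace_double_quotes_comprehensive; infer_instance

def Spec_replace_double_quotes_comprehensive (content : String) (out : String) : Prop :=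
  ¬ D_replace_double_quotes_comprehensive content → out = replace_double_quotes_comprehensive_alt content
instance (content : String) (out : String) : Decidable (Spec_replace_double_quotes_comprehensive content out) := by
  unfold Spec_replace_double_quotes_comprehensive; infer_instance

def pvDiffWitness_replace_double_quotes_comprehensive : String := "json __TEMP_ESCAPED__"
def pvDiffWitnessOut_replace_double_quotes_comprehensive : String × String :=
  ("json \\\"", "json __TEMP_ESCAPED__")

-- ===== CLAIM (what is proved, stated in full; the proofs are below) =====
def Claim_unchanged_replace_double_quotes_comprehensive : Prop := ∀ (content : String), Dom_replace_double_quotes_comprehensive content → Spec_replace_double_quotes_comprehensive content (replace_double_quotes_comprehensive content)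
def Claim_exact_replace_double_quotes_comprehensive : Prop := ∀ (content : String), Dom_replace_double_quotes_comprehensive content → D_replace_double_quotes_comprehensive content → replace_double_quotes_comprehensive content ≠ replace_double_quotes_comprehensive_alt content
def Claim_changed_replace_double_quotes_comprehensive : Prop := Dom_replace_double_quotes_comprehensive (pvDiffWitness_replace_double_quotes_comprehensive) ∧ D_replace_double_quotes_comprehensive (pvDiffWitness_replace_double_quotes_comprehensive) ∧ replace_double_quotes_comprehensive (pvDiffWitness_replace_double_quotes_comprehensive) = pvDiffWitnessOut_replace_double_quotes_comprehensive.1 ∧ replace_double_quotes_comprehensive_alt (pvDiffWitness_replace_double_quotes_comprehensive) = pvDiffWitnessOut_replace_double_quotes_comprehensive.2 ∧ pvDiffWitnessOut_replace_double_quotes_comprehensive.1 ≠ pvDiffWitnessOut_replace_double_quotes_comprehensive.2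

-- ===== LEMMAS AND PROOFS =====

-- generic characterisation of PySem.Chars.replace for a nonempty pattern
theorem pvGoZero (old nw l acc : List Char) :
    PySem.Chars.replace.go old nw 0 l acc = acc.reverse ++ l := by
  rw [PySem.Chars.replace.go.eq_def]

theorem pvGoNil (old nw : List Char) (f : Nat) (acc : List Char) :
    PySem.Chars.replace.go old nw (f+1) [] acc = acc.reverse := by
  rw [PySem.Chars.replace.go.eq_def]

theorem pvGoCons (old nw : List Char) (f : Nat) (c : Char) (t acc : List Char) :
    PySem.Chars.replace.go old nw (f+1) (c::t) acc =
      if old.isPrefixOf (c::t) = true then PySem.Chars.replace.go old nw f (List.drop old.length (c::t)) (nw.reverse ++ acc)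
      else PySem.Chars.replace.go old nw f t (c :: acc) := by
  rw [PySem.Chars.replace.go.eq_def]

theorem pvGoAcc (old nw : List Char) : ∀ (fuel : Nat) (l acc : List Char),
    PySem.Chars.replace.go old nw fuel l acc = acc.reverse ++ PySem.Chars.replace.go old nw fuel l [] := by
  intro fuel
  induction fuel with
  | zero => intro l acc; rw [pvGoZero, pvGoZero]; simp
  | succ f ih =>
    intro l acc
    cases l with
    | nil => rw [pvGoNil, pvGoNil]; simp
    | cons c t =>
      rw [pvGoCons, pvGoCons]
      split_ifs with h
      · rw [ih _ (nw.reverse ++ acc), ih _ (nw.reverse ++ [])]; simp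
      · rw [ih _ (c :: acc), ih _ [c]]; simp

theorem pvGoFuel (old nw : List Char) (hold : old ≠ []) : ∀ (f : Nat) (l acc : List Char), l.length ≤ f →
    PySem.Chars.replace.go old nw f l acc = PySem.Chars.replace.go old nw l.length l acc := by
  intro f
  induction f using Nat.strong_induction_on with
  | _ f ih =>
    intro l acc h
    match f with
    | 0 =>
      cases l with
      | nil => rfl
      | cons c t => simp at h
    | Nat.succ f =>
      cases l with
      | nil => rw [pvGoNil]; simp [pvGoZero]
      | cons c t =>
        have hop : 0 < old.length := List.length_pos_iff.mpr hold
        have ht : t.length ≤ f := by simp at h; omega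
        rw [pvGoCons]
        conv_rhs => rw [show (c :: t).length = t.length + 1 from rfl, pvGoCons]
        split_ifs with hp
        · have hd : (List.drop old.length (c :: t)).length ≤ t.length := by
            simp only [List.length_drop, List.length_cons]; omega
          rw [ih f (by omega) _ _ (by omega), ih t.length (by omega) _ _ hd]
        · rw [ih f (by omega) _ _ ht, ih t.length (by omega) _ _ (le_refl _)]

theorem pvReplacePrefix (old nw l : List Char) (hold : old ≠ []) (hp : old <+: l) :
    PySem.Chars.replace l old nw = nw ++ PySem.Chars.replace (l.drop old.length) old nw := by
  have hop : 0 < old.length := List.length_pos_iff.mpr hold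
  have hl : l ≠ [] := by
    intro h; subst h; simp at hp; exact hold hp
  obtain ⟨c, t, rfl⟩ := List.exists_cons_of_ne_nil hl
  rw [PySem.Chars.replace, PySem.Chars.replace]
  simp only [List.isEmpty_iff, hold, if_false]
  rw [show (c :: t).length = t.length + 1 from rfl, pvGoCons]
  rw [if_pos (List.isPrefixOf_iff_prefix.mpr hp)]
  have hd : (List.drop old.length (c :: t)).length ≤ t.length := by
    simp only [List.length_drop, List.length_cons]; omega
  rw [pvGoFuel old nw hold t.length _ _ hd, pvGoAcc]
  simp

theorem pvReplaceCons (old nw : List Char) (c : Char) (t : List Char) (hold : old ≠ []) (hn : ¬ (old <+: (c :: t))) :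
    PySem.Chars.replace (c :: t) old nw = c :: PySem.Chars.replace t old nw := by
  rw [PySem.Chars.replace, PySem.Chars.replace]
  simp only [List.isEmpty_iff, hold, if_false]
  rw [show (c :: t).length = t.length + 1 from rfl, pvGoCons]
  rw [if_neg (by simpa [List.isPrefixOf_iff_prefix] using hn)]
  rw [pvGoAcc]
  simp

theorem pvReplaceNilB (old nw : List Char) (hold : old ≠ []) : PySem.Chars.replace [] old nw = [] := by
  rw [PySem.Chars.replace]
  simp only [List.isEmpty_iff, hold, if_false]
  simp [pvGoZero]

-- the concrete patterns of A's three passes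
def cB : List Char := ['\\', '"', '"']
def cT : List Char := ['_','_','T','E','M','P','_','E','S','C','A','P','E','D','_','_']
def cQ : List Char := ['"', '"']
def cBS : List Char := ['\\', '"']
def cS : List Char := ['_','T','E','M','P','_','E','S','C','A','P','E','D','_','_']
def cBad2 : List Char := ['_','_','T','E','M','P','_','E','S','C','A','P','E','D','\\','"','"']
def cBad3 : List Char := ['_','_','T','E','M','P','_','E','S','C','A','P','E','D','_','\\','"','"']

-- A's per-line composite, at the character level
def pvChain2 (l : List Char) : List Char :=
  PySem.Chars.replace (PySem.Chars.replace l cB cT) cQ ['\'']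
def pvChain3 (l : List Char) : List Char :=
  PySem.Chars.replace (pvChain2 l) cT cBS

def pvBadL (l : List Char) : Prop := cT <:+: l ∨ cBad2 <:+: l ∨ cBad3 <:+: l

theorem pvStepQ (c : Char) (y : List Char) (h : c ≠ '"') :
    PySem.Chars.replace (c :: y) cQ ['\''] = c :: PySem.Chars.replace y cQ ['\''] := by
  refine pvReplaceCons _ _ _ _ (by decide) ?_
  intro hp
  rw [cQ, List.cons_prefix_cons] at hp
  exact h hp.1.symm

theorem pvStepT (c : Char) (y : List Char) (h : c ≠ '_') :
    PySem.Chars.replace (c :: y) cT cBS = c :: PySem.Chars.replace y cT cBS := by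
  refine pvReplaceCons _ _ _ _ (by decide) ?_
  intro hp
  rw [cT, List.cons_prefix_cons] at hp
  exact h hp.1.symm

theorem pvStepB (c : Char) (y : List Char) (h : c ≠ '\\') :
    PySem.Chars.replace (c :: y) cB cT = c :: PySem.Chars.replace y cB cT := by
  refine pvReplaceCons _ _ _ _ (by decide) ?_
  intro hp
  rw [cB, List.cons_prefix_cons] at hp
  exact h hp.1.symm

-- the placeholder block passes unchanged through the '""' pass
theorem pvTThruQ (x : List Char) :
    PySem.Chars.replace (cT ++ x) cQ ['\''] = cT ++ PySem.Chars.replace x cQ ['\''] := by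
  rw [show cT ++ x = '_'::'_'::'T'::'E'::'M'::'P'::'_'::'E'::'S'::'C'::'A'::'P'::'E'::'D'::'_'::'_'::x from rfl]
  rw [pvStepQ _ _ (by decide), pvStepQ _ _ (by decide), pvStepQ _ _ (by decide), pvStepQ _ _ (by decide),
      pvStepQ _ _ (by decide), pvStepQ _ _ (by decide), pvStepQ _ _ (by decide), pvStepQ _ _ (by decide),
      pvStepQ _ _ (by decide), pvStepQ _ _ (by decide), pvStepQ _ _ (by decide), pvStepQ _ _ (by decide),
      pvStepQ _ _ (by decide), pvStepQ _ _ (by decide), pvStepQ _ _ (by decide), pvStepQ _ _ (by decide)]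
  rfl

theorem pvTRestore (x : List Char) :
    PySem.Chars.replace (cT ++ x) cT cBS = cBS ++ PySem.Chars.replace x cT cBS := by
  rw [pvReplacePrefix _ _ _ (by decide) (List.prefix_append _ _)]
  congr 1

theorem pvBThru (x : List Char) :
    PySem.Chars.replace (cB ++ x) cB cT = cT ++ PySem.Chars.replace x cB cT := by
  rw [pvReplacePrefix _ _ _ (by decide) (List.prefix_append _ _)]
  congr 1

theorem pvHeadRep (t : List Char) (h : t.head? ≠ some '"') :
    (PySem.Chars.replace t cB cT).head? ≠ some '"' := by
  cases t with
  | nil => rw [pvReplaceNilB _ _ (by decide)]; simp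
  | cons c t' =>
    by_cases hp : cB <+: (c :: t')
    · obtain ⟨z, hz⟩ := hp
      rw [← hz, pvBThru]
      simp [cT]
    · rw [pvReplaceCons _ _ _ _ (by decide) hp]
      simpa using h

theorem pvChain2Cons (c : Char) (t : List Char)
    (h1 : c = '\\' → ¬ (cQ <+: t))
    (h2 : c = '"' → t.head? ≠ some '"') :
    pvChain2 (c :: t) = c :: pvChain2 t := by
  have hB : ¬ (cB <+: (c :: t)) := by
    intro hp
    rw [show cB = '\\' :: cQ from rfl, List.cons_prefix_cons] at hp
    exact h1 hp.1.symm hp.2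
  unfold pvChain2
  rw [pvReplaceCons _ _ _ _ (by decide) hB]
  by_cases hc : c = '"'
  · subst hc
    refine pvReplaceCons _ _ _ _ (by decide) ?_
    intro hp
    rw [cQ, List.cons_prefix_cons] at hp
    obtain ⟨z, hz⟩ := hp.2
    have := pvHeadRep t (h2 rfl)
    rw [← hz] at this
    simp at this hz
  · exact pvStepQ _ _ hc

theorem pvSufPre (r : List Char) (h1 : r <:+ cS) (h2 : r <+: cT) :
    r = [] ∨ r = ['_'] ∨ r = ['_','_'] := by
  obtain ⟨u, hu⟩ := h1
  have hr : r = cS.drop u.length := by rw [← hu, List.drop_left]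
  have hul : u.length ≤ 15 := by
    have := congrArg List.length hu
    simp [cS] at this
    omega
  clear hu
  generalize hn : u.length = n at hr hul
  interval_cases n <;> (subst hr; revert h2; decide)

theorem pvInfixCons (x : List Char) (c : Char) (t : List Char) (h : x <:+: t) : x <:+: (c :: t) :=
  h.trans (List.suffix_cons c t).isInfix

theorem pvBadCons (c : Char) (t : List Char) (h : pvBadL t) : pvBadL (c :: t) := by
  rcases h with h | h | h
  · exact Or.inl (pvInfixCons _ _ _ h)
  · exact Or.inr (Or.inl (pvInfixCons _ _ _ h))
  · exact Or.inr (Or.inr (pvInfixCons _ _ _ h))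

theorem pvChain2Nil : pvChain2 [] = [] := by
  unfold pvChain2
  rw [pvReplaceNilB _ _ (by decide), pvReplaceNilB _ _ (by decide)]

theorem pvChain2B (z : List Char) : pvChain2 (cB ++ z) = cT ++ pvChain2 z := by
  unfold pvChain2
  rw [pvBThru, pvTThruQ]

theorem pvChain2Q (z : List Char) (hB2 : ¬ (cB <+: ('"' :: '"' :: z))) :
    pvChain2 ('"' :: '"' :: z) = '\'' :: pvChain2 z := by
  unfold pvChain2
  rw [pvReplaceCons _ _ _ _ (by decide) hB2]
  rw [pvStepB _ _ (by decide)]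
  rw [pvReplacePrefix _ _ _ (by decide) (by exact ⟨_, rfl⟩ : cQ <+: '"' :: '"' :: PySem.Chars.replace z cB cT)]
  rfl

theorem pvPref (t r : List Char) (hs : r <:+ cS) (hne : r ≠ []) (hp : r <+: pvChain2 t) :
    r <+: t ∨ (∃ r₁, r = r₁ ++ ['_','_'] ∧ r₁ ++ cB <+: t) ∨ (∃ r₁, r = r₁ ++ ['_'] ∧ r₁ ++ cB <+: t) := by
  cases t with
  | nil =>
    rw [pvChain2Nil] at hp
    exact absurd (List.prefix_nil.mp hp) hne
  | cons c t1 =>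
    by_cases hB : cB <+: (c :: t1)
    · obtain ⟨z, hz⟩ := hB
      rw [← hz, pvChain2B] at hp
      have hrT : r <+: cT := by
        obtain ⟨w, hw⟩ := hp
        have hlen : r.length ≤ 15 := by
          have := hs.length_le; simpa [cS] using this
        have hr : r = (cT ++ pvChain2 z).take r.length := by rw [← hw]; simp
        rw [List.take_append_of_le_length (by simp [cT]; omega)] at hr
        rw [hr]
        exact List.take_prefix _ _
      rcases pvSufPre r hs hrT with h0 | h1 | h2
      · exact absurd h0 hne
      · refine Or.inr (Or.inr ⟨[], by simpa using h1, ?_⟩)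
        rw [← hz]; simp
      · refine Or.inr (Or.inl ⟨[], by simpa using h2, ?_⟩)
        rw [← hz]; simp
    · by_cases hQ : cQ <+: (c :: t1)
      · obtain ⟨z, hz⟩ := hQ
        have hc : c = '"' ∧ t1 = '"' :: z := by
          rw [cQ] at hz; simp at hz; exact ⟨hz.1.symm, hz.2.symm⟩
        obtain ⟨rfl, rfl⟩ := hc
        rw [pvChain2Q z hB] at hp
        obtain ⟨hd, r', rfl⟩ := List.exists_cons_of_ne_nil hne
        rw [List.cons_prefix_cons] at hp
        have hmem : hd ∈ cS := hs.subset List.mem_cons_self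
        rw [hp.1] at hmem
        exact absurd hmem (by decide)
      · have h1 : c = '\\' → ¬ (cQ <+: t1) := by
          intro hc hq
          exact hB (by rw [show cB = '\\' :: cQ from rfl, hc]; exact List.cons_prefix_cons.mpr ⟨rfl, hq⟩)
        have h2 : c = '"' → t1.head? ≠ some '"' := by
          intro hc hh
          apply hQ
          cases t1 with
          | nil => simp at hh
          | cons d t2 =>
            simp at hh
            rw [hc, hh, cQ]
            exact List.cons_prefix_cons.mpr ⟨rfl, List.cons_prefix_cons.mpr ⟨rfl, List.nil_prefix⟩⟩
        rw [pvChain2Cons c t1 h1 h2] at hp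
        obtain ⟨hd, r', rfl⟩ := List.exists_cons_of_ne_nil hne
        rw [List.cons_prefix_cons] at hp
        obtain ⟨rfl, hp'⟩ := hp
        by_cases hr' : r' = []
        · subst hr'
          exact Or.inl (List.cons_prefix_cons.mpr ⟨rfl, List.nil_prefix⟩)
        · have hs' : r' <:+ cS := (List.suffix_cons hd r').trans hs
          rcases pvPref t1 r' hs' hr' hp' with ha | ⟨r₁, he, hpre⟩ | ⟨r₁, he, hpre⟩
          · exact Or.inl (List.cons_prefix_cons.mpr ⟨rfl, ha⟩)
          · exact Or.inr (Or.inl ⟨hd :: r₁, by rw [he]; rfl,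
              List.cons_prefix_cons.mpr ⟨rfl, hpre⟩⟩)
          · exact Or.inr (Or.inr ⟨hd :: r₁, by rw [he]; rfl,
              List.cons_prefix_cons.mpr ⟨rfl, hpre⟩⟩)
termination_by t.length

theorem pvScanCons (c : Char) (t1 : List Char) (h1 : ¬ (cB <+: c :: t1)) (h2 : ¬ (cQ <+: c :: t1)) :
    pvScan (c :: t1) = c :: pvScan t1 := by
  rw [pvScan.eq_def]
  split
  · next rest heq => exact absurd ⟨rest, heq.symm⟩ h1
  · next rest heq => exact absurd ⟨rest, heq.symm⟩ h2
  · next c' rest' _ _ heq =>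
    injection heq with hc ht
    rw [hc, ht]
  · next heq => simp at heq

-- the heart of the proof: on a line avoiding the three collision patterns,
-- A's three passes equal B's single scan
theorem pvMain (l : List Char) (hb : ¬ pvBadL l) : pvChain3 l = pvScan l := by
  cases l with
  | nil =>
    unfold pvChain3
    rw [pvChain2Nil, pvReplaceNilB _ _ (by decide)]
    simp [pvScan]
  | cons c t1 =>
    by_cases hB : cB <+: (c :: t1)
    · obtain ⟨z, hz⟩ := hB
      have hbz : ¬ pvBadL z := fun h => hb (by
        rw [← hz]; exact pvBadCons _ _ (pvBadCons _ _ (pvBadCons _ _ h)))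
      rw [← hz]
      unfold pvChain3
      rw [pvChain2B, pvTRestore]
      have ih := pvMain z hbz
      unfold pvChain3 at ih
      rw [ih]
      rw [show cB ++ z = '\\'::'"'::'"'::z from rfl]
      simp [pvScan, cBS]
    · by_cases hQ : cQ <+: (c :: t1)
      · obtain ⟨z, hz⟩ := hQ
        have hc : c = '"' ∧ t1 = '"' :: z := by
          rw [cQ] at hz; simp at hz; exact ⟨hz.1.symm, hz.2.symm⟩
        obtain ⟨rfl, rfl⟩ := hc
        have hbz : ¬ pvBadL z := fun h => hb (pvBadCons _ _ (pvBadCons _ _ h))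
        unfold pvChain3
        rw [pvChain2Q z hB, pvStepT _ _ (by decide)]
        have ih := pvMain z hbz
        unfold pvChain3 at ih
        rw [ih]
        simp [pvScan]
      · have h1 : c = '\\' → ¬ (cQ <+: t1) := by
          intro hc hq
          exact hB (by rw [show cB = '\\' :: cQ from rfl, hc]; exact List.cons_prefix_cons.mpr ⟨rfl, hq⟩)
        have h2 : c = '"' → t1.head? ≠ some '"' := by
          intro hc hh
          apply hQ
          cases t1 with
          | nil => simp at hh
          | cons d t2 =>
            simp at hh
            rw [hc, hh, cQ]
            exact List.cons_prefix_cons.mpr ⟨rfl, List.cons_prefix_cons.mpr ⟨rfl, List.nil_prefix⟩⟩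
        unfold pvChain3
        rw [pvChain2Cons c t1 h1 h2]
        have hT : ¬ (cT <+: (c :: pvChain2 t1)) := by
          intro hpT
          rw [show cT = '_' :: cS from rfl, List.cons_prefix_cons] at hpT
          obtain ⟨hc, hS⟩ := hpT
          rcases pvPref t1 cS (List.suffix_refl cS) (by decide) hS with ha | ⟨r₁, he, hpre⟩ | ⟨r₁, he, hpre⟩
          · exact hb (Or.inl (List.cons_prefix_cons.mpr ⟨hc, ha⟩ :
              cT <+: c :: t1).isInfix)
          · have hr₁ : r₁ = ['_','T','E','M','P','_','E','S','C','A','P','E','D'] := by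
              apply List.append_cancel_right (bs := (['_','_'] : List Char))
              rw [← he]; rfl
            rw [hr₁] at hpre
            exact hb (Or.inr (Or.inl (List.cons_prefix_cons.mpr ⟨hc, hpre⟩ :
              cBad2 <+: c :: t1).isInfix))
          · have hr₁ : r₁ = ['_','T','E','M','P','_','E','S','C','A','P','E','D','_'] := by
              apply List.append_cancel_right (bs := (['_'] : List Char))
              rw [← he]; rfl
            rw [hr₁] at hpre
            exact hb (Or.inr (Or.inr (List.cons_prefix_cons.mpr ⟨hc, hpre⟩ :
              cBad3 <+: c :: t1).isInfix))
        rw [pvReplaceCons _ _ _ _ (by decide) hT]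
        have ih := pvMain t1 (fun h => hb (pvBadCons _ _ h))
        unfold pvChain3 at ih
        rw [ih, pvScanCons c t1 hB hQ]
termination_by l.length
decreasing_by
  all_goals
    subst_vars <;>
    first
      | (have hL := congrArg List.length hz; simp [cB, cQ] at hL; simp; omega)
      | (simp; omega)
      | simp

theorem pvToListEq (x y : String) (h : x.toList = y.toList) : x = y := by
  have hx : String.ofList x.toList = x := by simp
  have hy : String.ofList y.toList = y := by simp
  rw [← hx, ← hy, h]

theorem pvLitB : ("\\\"\"" : String).toList = cB := by decide
theorem pvLitT : ("__TEMP_ESCAPED__" : String).toList = cT := by decide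
theorem pvLitQ : ("\"\"" : String).toList = cQ := by decide
theorem pvLitA : ("'" : String).toList = ['\''] := by decide
theorem pvLitBS : ("\\\"" : String).toList = cBS := by decide
theorem pvLitBad2 : ("__TEMP_ESCAPED\\\"\"" : String).toList = cBad2 := by decide
theorem pvLitBad3 : ("__TEMP_ESCAPED_\\\"\"" : String).toList = cBad3 := by decide

theorem pvLineEq (line : String)
    (hnb : pvGuard line = true →
      ¬ (PySem.Str.isIn "__TEMP_ESCAPED__" line = true ∨
         PySem.Str.isIn "__TEMP_ESCAPED\\\"\"" line = true ∨
         PySem.Str.isIn "__TEMP_ESCAPED_\\\"\"" line = true)) :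
    (if pvGuard line then
      let l1 := PySem.Str.replace line "\\\"\"" "__TEMP_ESCAPED__"
      let l2 := PySem.Str.replace l1 "\"\"" "'"
      PySem.Str.replace l2 "__TEMP_ESCAPED__" "\\\""
    else line) =
    (if pvGuard line then String.ofList (pvScan line.toList) else line) := by
  by_cases hg : pvGuard line
  · rw [if_pos hg, if_pos hg]
    have hbad : ¬ pvBadL line.toList := by
      intro hbad
      apply hnb hg
      rcases hbad with h | h | h
      · exact Or.inl (by rw [PySem.Str.isIn_iff_infix, pvLitT]; exact h)
      · exact Or.inr (Or.inl (by rw [PySem.Str.isIn_iff_infix, pvLitBad2]; exact h))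
      · exact Or.inr (Or.inr (by rw [PySem.Str.isIn_iff_infix, pvLitBad3]; exact h))
    have hmain := pvMain line.toList hbad
    apply pvToListEq
    simp only [PySem.Str.toList_replace, pvLitB, pvLitT, pvLitQ, pvLitA, pvLitBS]
    rw [show PySem.Chars.replace
          (PySem.Chars.replace (PySem.Chars.replace line.toList cB cT) cQ ['\'']) cT cBS
        = pvChain3 line.toList from rfl, hmain]
    simp
  · rw [if_neg hg, if_neg hg]

-- ===== tightness: A and B differ on EVERY input inside D_ =====

theorem pvPrefixLift (u x v : List Char) (h : x <+: v) : u ++ x <+: u ++ v := by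
  obtain ⟨w, rfl⟩ := h
  exact ⟨w, by simp⟩

theorem pvBadPeel (c : Char) (hc : c ≠ '_') (t : List Char) (h : pvBadL (c :: t)) : pvBadL t := by
  have step : ∀ p : List Char, p.head? = some '_' → p <:+: (c :: t) → p <:+: t := by
    intro p hp hinf
    rcases List.infix_cons_iff.mp hinf with hpre | hinf'
    · cases p with
      | nil => simp at hp
      | cons d p' =>
        simp at hp
        rw [List.cons_prefix_cons] at hpre
        exact absurd (hp ▸ hpre.1.symm) hc
    · exact hinf'
  rcases h with h | h | h
  · exact Or.inl (step _ (by decide) h)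
  · exact Or.inr (Or.inl (step _ (by decide) h))
  · exact Or.inr (Or.inr (step _ (by decide) h))

theorem pvChain2Plain (p : List Char) (hp : ∀ d ∈ p, d ≠ '\\' ∧ d ≠ '"') :
    ∀ y, pvChain2 (p ++ y) = p ++ pvChain2 y := by
  induction p with
  | nil => intro y; simp
  | cons d p' ih =>
    intro y
    have hd := hp d List.mem_cons_self
    rw [List.cons_append,
        pvChain2Cons d (p' ++ y) (fun h => (hd.1 h).elim) (fun h => (hd.2 h).elim),
        ih (fun e he => hp e (List.mem_cons_of_mem _ he)) y]
    simp

theorem pvPlainAll (p : List Char) (h : ('\\' ∈ p → False) ∧ ('"' ∈ p → False)) :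
    ∀ d ∈ p, d ≠ '\\' ∧ d ≠ '"' := by
  intro d hd
  refine ⟨fun he => h.1 ?_, fun he => h.2 ?_⟩ <;> (subst he; exact hd)

-- if the spurious-restore condition fires at the head, A continues with '\' where B has '_'
set_option maxRecDepth 8000 in
theorem pvExactL (l : List Char) (hb : pvBadL l) : pvChain3 l ≠ pvScan l := by
  cases l with
  | nil =>
    exfalso; revert hb; unfold pvBadL; decide
  | cons c t1 =>
    by_cases hB : cB <+: (c :: t1)
    · obtain ⟨z, hz⟩ := hB
      have hc : c = '\\' ∧ t1 = '"' :: '"' :: z := by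
        rw [cB] at hz; simp at hz; exact ⟨hz.1.symm, hz.2.symm⟩
      obtain ⟨rfl, rfl⟩ := hc
      have hbz : pvBadL z :=
        pvBadPeel _ (by decide) _ (pvBadPeel _ (by decide) _ (pvBadPeel _ (by decide) _ hb))
      have ihz := pvExactL z hbz
      rw [show ('\\' :: '"' :: '"' :: z) = cB ++ z from rfl]
      unfold pvChain3
      rw [pvChain2B, pvTRestore]
      rw [show cB ++ z = '\\'::'"'::'"'::z from rfl]
      intro heq
      apply ihz
      simp [pvScan, cBS] at heq
      unfold pvChain3
      exact heq
    · by_cases hQ : cQ <+: (c :: t1)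
      · obtain ⟨z, hz⟩ := hQ
        have hc : c = '"' ∧ t1 = '"' :: z := by
          rw [cQ] at hz; simp at hz; exact ⟨hz.1.symm, hz.2.symm⟩
        obtain ⟨rfl, rfl⟩ := hc
        have hbz : pvBadL z :=
          pvBadPeel _ (by decide) _ (pvBadPeel _ (by decide) _ hb)
        have ihz := pvExactL z hbz
        unfold pvChain3
        rw [pvChain2Q z hB, pvStepT _ _ (by decide)]
        intro heq
        apply ihz
        simp [pvScan] at heq
        unfold pvChain3
        exact heq
      · have h1 : c = '\\' → ¬ (cQ <+: t1) := by
          intro hc hq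
          exact hB (by rw [show cB = '\\' :: cQ from rfl, hc]; exact List.cons_prefix_cons.mpr ⟨rfl, hq⟩)
        have h2 : c = '"' → t1.head? ≠ some '"' := by
          intro hc hh
          apply hQ
          cases t1 with
          | nil => simp at hh
          | cons d t2 =>
            simp at hh
            rw [hc, hh, cQ]
            exact List.cons_prefix_cons.mpr ⟨rfl, List.cons_prefix_cons.mpr ⟨rfl, List.nil_prefix⟩⟩
        by_cases hT : cT <+: (c :: pvChain2 t1)
        · -- FIRE: heads differ
          have hcc : c = '_' ∧ cS <+: pvChain2 t1 := by
            rw [show cT = '_' :: cS from rfl, List.cons_prefix_cons] at hT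
            exact ⟨hT.1.symm, hT.2⟩
          obtain ⟨rfl, _⟩ := hcc
          unfold pvChain3
          rw [pvChain2Cons _ t1 h1 h2]
          rw [pvReplacePrefix _ _ _ (by decide) hT]
          rw [pvScanCons _ t1 hB hQ]
          intro heq
          simp [cBS] at heq
        · -- no fire: peel one character
          have hbt : pvBadL t1 := by
            by_cases hc_ : c = '_'
            · subst hc_
              have fire1 : cS <+: t1 → False := by
                intro hpre
                obtain ⟨w, rfl⟩ := hpre
                apply hT
                rw [pvChain2Plain cS (pvPlainAll _ (by decide)) w, show cT = '_' :: cS from rfl]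
                exact List.cons_prefix_cons.mpr ⟨rfl, List.prefix_append _ _⟩
              rcases hb with h | h | h
              · rcases List.infix_cons_iff.mp h with hpre | hinf
                · rw [show cT = '_' :: cS from rfl, List.cons_prefix_cons] at hpre
                  exact absurd (fire1 hpre.2) not_false
                · exact Or.inl hinf
              · rcases List.infix_cons_iff.mp h with hpre | hinf
                · exfalso
                  rw [show cBad2 = '_' :: (['_','T','E','M','P','_','E','S','C','A','P','E','D'] ++ cB) from by decide,
                      List.cons_prefix_cons] at hpre
                  obtain ⟨w, rfl⟩ := hpre.2
                  apply hT
                  rw [show ['_','T','E','M','P','_','E','S','C','A','P','E','D'] ++ cB ++ w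
                      = ['_','T','E','M','P','_','E','S','C','A','P','E','D'] ++ (cB ++ w) from by simp,
                      pvChain2Plain _ (pvPlainAll _ (by decide)) _, pvChain2B]
                  rw [show cT = '_' :: cS from rfl]
                  refine List.cons_prefix_cons.mpr ⟨rfl, ?_⟩
                  rw [show cS = ['_','T','E','M','P','_','E','S','C','A','P','E','D'] ++ ['_','_'] from by decide]
                  exact pvPrefixLift _ _ _ ((by decide : (['_','_'] : List Char) <+: cT).trans (List.prefix_append _ _))
                · exact Or.inr (Or.inl hinf)
              · rcases List.infix_cons_iff.mp h with hpre | hinf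
                · exfalso
                  rw [show cBad3 = '_' :: (['_','T','E','M','P','_','E','S','C','A','P','E','D','_'] ++ cB) from by decide,
                      List.cons_prefix_cons] at hpre
                  obtain ⟨w, rfl⟩ := hpre.2
                  apply hT
                  rw [show ['_','T','E','M','P','_','E','S','C','A','P','E','D','_'] ++ cB ++ w
                      = ['_','T','E','M','P','_','E','S','C','A','P','E','D','_'] ++ (cB ++ w) from by simp,
                      pvChain2Plain _ (pvPlainAll _ (by decide)) _, pvChain2B]
                  rw [show cT = '_' :: cS from rfl]
                  refine List.cons_prefix_cons.mpr ⟨rfl, ?_⟩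
                  rw [show cS = ['_','T','E','M','P','_','E','S','C','A','P','E','D','_'] ++ ['_'] from by decide]
                  exact pvPrefixLift _ _ _ ((by decide : (['_'] : List Char) <+: cT).trans (List.prefix_append _ _))
                · exact Or.inr (Or.inr hinf)
            · exact pvBadPeel c hc_ t1 hb
          have iht := pvExactL t1 hbt
          unfold pvChain3
          rw [pvChain2Cons c t1 h1 h2, pvReplaceCons _ _ _ _ (by decide) hT,
              pvScanCons c t1 hB hQ]
          intro heq
          simp only [List.cons.injEq] at heq
          exact iht heq.2
termination_by l.length
decreasing_by
  all_goals
    subst_vars <;>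
    first
      | (have hL := congrArg List.length hz; simp [cB, cQ] at hL; simp; omega)
      | (simp; omega)
      | simp

theorem pvTakeNl (u : List Char) (hu : '\n' ∉ u) (r : List Char) :
    (u ++ '\n' :: r).takeWhile (fun c => !(c == '\n')) = u := by
  induction u with
  | nil => simp [List.takeWhile_cons]
  | cons d u' ih =>
    have hd : d ≠ '\n' := fun h => hu (by simp [h])
    simp only [List.cons_append, List.takeWhile_cons]
    simp [hd, ih (fun h => hu (List.mem_cons_of_mem _ h))]

theorem pvJoinNe : ∀ (xs ys : List (List Char)), xs.length = ys.length →
    (∀ p ∈ xs, '\n' ∉ p) → (∀ p ∈ ys, '\n' ∉ p) → xs ≠ ys →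
    PySem.Chars.join ['\n'] xs ≠ PySem.Chars.join ['\n'] ys := by
  intro xs
  induction xs with
  | nil =>
    intro ys hl _ _ hne
    cases ys with
    | nil => exact absurd rfl hne
    | cons y yr => simp at hl
  | cons x xr ih =>
    intro ys hl hx hy hne
    cases ys with
    | nil => simp at hl
    | cons y yr =>
      by_cases hxy : x = y
      · subst hxy
        have hne' : xr ≠ yr := fun h => hne (by rw [h])
        cases xr with
        | nil =>
          cases yr with
          | nil => exact absurd rfl hne'
          | cons y2 yr2 => simp at hl
        | cons x2 xr2 =>
          cases yr with
          | nil => simp at hl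
          | cons y2 yr2 =>
            rw [PySem.Chars.join_cons_cons, PySem.Chars.join_cons_cons]
            intro heq
            have heq2 := List.append_cancel_left heq
            exact ih (y2 :: yr2) (by simpa using hl)
              (fun p hp => hx p (List.mem_cons_of_mem _ hp))
              (fun p hp => hy p (List.mem_cons_of_mem _ hp)) hne' heq2
      · cases xr with
        | nil =>
          cases yr with
          | nil => rw [PySem.Chars.join_singleton, PySem.Chars.join_singleton]; exact hxy
          | cons y2 yr2 => simp at hl
        | cons x2 xr2 =>
          cases yr with
          | nil => simp at hl
          | cons y2 yr2 =>
            rw [PySem.Chars.join_cons_cons, PySem.Chars.join_cons_cons]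
            intro heq
            apply hxy
            have hx0 : '\n' ∉ x := hx x List.mem_cons_self
            have hy0 : '\n' ∉ y := hy y List.mem_cons_self
            have htw := congrArg (List.takeWhile (fun c => !(c == '\n'))) heq
            rw [show x ++ ['\n'] ++ PySem.Chars.join ['\n'] (x2 :: xr2)
                  = x ++ '\n' :: PySem.Chars.join ['\n'] (x2 :: xr2) from by simp,
                show y ++ ['\n'] ++ PySem.Chars.join ['\n'] (y2 :: yr2)
                  = y ++ '\n' :: PySem.Chars.join ['\n'] (y2 :: yr2) from by simp,
                pvTakeNl x hx0, pvTakeNl y hy0] at htw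
            exact htw

theorem pvReplaceMem (old nw : List Char) (hold : old ≠ []) (x : Char) :
    ∀ (l : List Char), x ∈ PySem.Chars.replace l old nw → x ∈ l ∨ x ∈ nw := by
  intro l
  cases l with
  | nil => rw [pvReplaceNilB _ _ hold]; intro h; simp at h
  | cons c t =>
    by_cases hp : old <+: (c :: t)
    · rw [pvReplacePrefix _ _ _ hold hp]
      intro hm
      rcases List.mem_append.mp hm with h | h
      · exact Or.inr h
      · rcases pvReplaceMem old nw hold x (List.drop old.length (c :: t)) h with h' | h'
        · exact Or.inl (List.drop_subset _ _ h')
        · exact Or.inr h'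
    · rw [pvReplaceCons _ _ _ _ hold hp]
      intro hm
      rcases List.mem_cons.mp hm with h | h
      · exact Or.inl (h ▸ List.mem_cons_self)
      · rcases pvReplaceMem old nw hold x t h with h' | h'
        · exact Or.inl (List.mem_cons_of_mem _ h')
        · exact Or.inr h'
termination_by l => l.length
decreasing_by
  · have : 0 < old.length := List.length_pos_iff.mpr hold
    simp; omega
  · simp

theorem pvScanNl (x : Char) (hx : x ≠ '\\' ∧ x ≠ '"' ∧ x ≠ '\'') :
    ∀ (l : List Char), x ∈ pvScan l → x ∈ l := by
  intro l
  cases l with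
  | nil => simp [pvScan]
  | cons c t =>
    by_cases hB : cB <+: (c :: t)
    · obtain ⟨z, hz⟩ := hB
      have hc : c = '\\' ∧ t = '"' :: '"' :: z := by
        rw [cB] at hz; simp at hz; exact ⟨hz.1.symm, hz.2.symm⟩
      obtain ⟨rfl, rfl⟩ := hc
      simp only [pvScan]
      intro hm
      rcases List.mem_cons.mp hm with h | h
      · exact (hx.1 h).elim
      · rcases List.mem_cons.mp h with h' | h'
        · exact (hx.2.1 h').elim
        · simp [pvScanNl x hx z h']
    · by_cases hQ : cQ <+: (c :: t)
      · obtain ⟨z, hz⟩ := hQ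
        have hc : c = '"' ∧ t = '"' :: z := by
          rw [cQ] at hz; simp at hz; exact ⟨hz.1.symm, hz.2.symm⟩
        obtain ⟨rfl, rfl⟩ := hc
        simp only [pvScan]
        intro hm
        rcases List.mem_cons.mp hm with h | h
        · exact (hx.2.2 h).elim
        · simp [pvScanNl x hx z h]
      · rw [pvScanCons c t hB hQ]
        intro hm
        rcases List.mem_cons.mp hm with h | h
        · exact h ▸ List.mem_cons_self
        · exact List.mem_cons_of_mem _ (pvScanNl x hx t h)
termination_by l => l.length
decreasing_by
  all_goals
    subst_vars <;>
    first
      | (have hL := congrArg List.length hz; simp [cB, cQ] at hL; simp; omega)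
      | (simp; omega)
      | simp

theorem pvChain3Nl (l : List Char) (hl : '\n' ∉ l) : '\n' ∉ pvChain3 l := by
  intro hm
  unfold pvChain3 pvChain2 at hm
  rcases pvReplaceMem _ _ (by decide) _ _ hm with h1 | h1
  · rcases pvReplaceMem _ _ (by decide) _ _ h1 with h2 | h2
    · rcases pvReplaceMem _ _ (by decide) _ _ h2 with h3 | h3
      · exact hl h3
      · simp [cT] at h3
    · simp at h2
  · simp [cBS] at h1

theorem pvSplitGoNil (sep : List Char) (f : Nat) (cur : List Char) (acc : List (List Char)) :
    PySem.Chars.splitOn.go sep (f+1) [] cur acc = (cur.reverse :: acc).reverse := by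
  rw [PySem.Chars.splitOn.go.eq_def]

theorem pvSplitGoCons (sep : List Char) (f : Nat) (c : Char) (rest cur : List Char) (acc : List (List Char)) :
    PySem.Chars.splitOn.go sep (f+1) (c :: rest) cur acc =
      if sep.isPrefixOf (c :: rest) = true then
        PySem.Chars.splitOn.go sep f (List.drop sep.length (c :: rest)) [] (cur.reverse :: acc)
      else PySem.Chars.splitOn.go sep f rest (c :: cur) acc := by
  rw [PySem.Chars.splitOn.go.eq_def]

theorem pvSplitGoNl : ∀ (fuel : Nat) (l cur : List Char) (acc : List (List Char)),
    l.length < fuel → '\n' ∉ cur → (∀ p ∈ acc, '\n' ∉ p) →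
    ∀ p ∈ PySem.Chars.splitOn.go ['\n'] fuel l cur acc, '\n' ∉ p := by
  intro fuel
  induction fuel with
  | zero => intro l cur acc h; omega
  | succ f ih =>
    intro l cur acc hf hcur hacc
    cases l with
    | nil =>
      rw [pvSplitGoNil]
      intro p hp
      rw [List.mem_reverse] at hp
      rcases List.mem_cons.mp hp with h | h
      · subst h; simpa using hcur
      · exact hacc p h
    | cons c rest =>
      rw [pvSplitGoCons]
      split_ifs with hpre
      · refine ih _ _ _ (by simp at hf ⊢; omega) (by simp) ?_
        intro p hp
        rcases List.mem_cons.mp hp with h | h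
        · subst h; simpa using hcur
        · exact hacc p h
      · have hc : c ≠ '\n' := by
          intro h
          apply hpre
          rw [List.isPrefixOf_iff_prefix, h]
          exact List.cons_prefix_cons.mpr ⟨rfl, List.nil_prefix⟩
        refine ih _ _ _ (by simp at hf ⊢; omega) ?_ hacc
        intro h
        rcases List.mem_cons.mp h with h' | h'
        · exact hc h'.symm
        · exact hcur h'

theorem pvSplitOnNl (s : List Char) : ∀ p ∈ PySem.Chars.splitOn s ['\n'], '\n' ∉ p := by
  rw [PySem.Chars.splitOn]
  exact pvSplitGoNl _ _ _ _ (by omega) (by simp) (by simp)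

theorem pvLines (content : String) :
    List.map String.toList ((PySem.Str.split? content "\n").getD []) =
      PySem.Chars.splitOn content.toList ['\n'] := by
  have h := PySem.Str.split?_map content "\n"
  rw [show ("\n" : String).toList = ['\n'] from by decide, PySem.Chars.split?] at h
  simp only [List.isEmpty_cons, Bool.false_eq_true, if_false] at h
  cases hs : PySem.Str.split? content "\n" with
  | none => rw [hs] at h; simp at h
  | some L => rw [hs] at h; simpa using h

theorem pvToListA (ln : String) (hg : pvGuard ln = true) :
    (if pvGuard ln then
      let l1 := PySem.Str.replace ln "\\\"\"" "__TEMP_ESCAPED__"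
      let l2 := PySem.Str.replace l1 "\"\"" "'"
      PySem.Str.replace l2 "__TEMP_ESCAPED__" "\\\""
    else ln).toList = pvChain3 ln.toList := by
  rw [if_pos hg]
  simp only [PySem.Str.toList_replace, pvLitB, pvLitT, pvLitQ, pvLitA, pvLitBS]
  rfl

theorem pvToListB (ln : String) (hg : pvGuard ln = true) :
    (if pvGuard ln then String.ofList (pvScan ln.toList) else ln).toList = pvScan ln.toList := by
  rw [if_pos hg]
  simp

-- ===== VERDICT (by name: the statements are the Claim_ definitions above) =====
theorem replace_double_quotes_comprehensive_spec : Claim_unchanged_replace_double_quotes_comprehensive := by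
  intro content _hdom
  unfold Spec_replace_double_quotes_comprehensive
  intro hD
  unfold replace_double_quotes_comprehensive replace_double_quotes_comprehensive_alt
  refine congrArg (PySem.Str.join "\n") (List.map_congr_left ?_)
  intro line hline
  apply pvLineEq
  intro hg habs
  exact hD ⟨line, hline, hg, habs⟩

set_option maxHeartbeats 2000000 in
theorem replace_double_quotes_comprehensive_changed : Claim_changed_replace_double_quotes_comprehensive := by
  unfold Claim_changed_replace_double_quotes_comprehensive
  decide

theorem replace_double_quotes_comprehensive_tight : Claim_exact_replace_double_quotes_comprehensive := by
  intro content _hdom hD heq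
  obtain ⟨line, hline, hg, hbadstr⟩ := hD
  have hbad : pvBadL line.toList := by
    rcases hbadstr with h | h | h
    · left; have := (PySem.Str.isIn_iff_infix _ _).mp h; rwa [pvLitT] at this
    · right; left; have := (PySem.Str.isIn_iff_infix _ _).mp h; rwa [pvLitBad2] at this
    · right; right; have := (PySem.Str.isIn_iff_infix _ _).mp h; rwa [pvLitBad3] at this
  have hne := pvExactL line.toList hbad
  unfold replace_double_quotes_comprehensive replace_double_quotes_comprehensive_alt at heq
  have h2 := congrArg String.toList heq
  rw [PySem.Str.toList_join, PySem.Str.toList_join, List.map_map, List.map_map,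
      show ("\n" : String).toList = ['\n'] from by decide] at h2
  have hlf : ∀ ln ∈ (PySem.Str.split? content "\n").getD [], '\n' ∉ ln.toList := by
    intro ln hln
    have hm : ln.toList ∈ List.map String.toList ((PySem.Str.split? content "\n").getD []) :=
      List.mem_map_of_mem hln
    rw [pvLines content] at hm
    exact pvSplitOnNl _ _ hm
  refine pvJoinNe _ _ (by simp) ?_ ?_ ?_ h2
  · intro p hp
    obtain ⟨ln, hln, rfl⟩ := List.mem_map.mp hp
    simp only [Function.comp_apply]
    by_cases hgl : pvGuard ln
    · rw [pvToListA ln hgl]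
      exact pvChain3Nl _ (hlf ln hln)
    · rw [if_neg hgl]
      exact hlf ln hln
  · intro p hp
    obtain ⟨ln, hln, rfl⟩ := List.mem_map.mp hp
    simp only [Function.comp_apply]
    by_cases hgl : pvGuard ln
    · rw [pvToListB ln hgl]
      intro hmem
      exact hlf ln hln (pvScanNl _ (by decide) _ hmem)
    · rw [if_neg hgl]
      exact hlf ln hln
  · intro hm
    rw [List.map_eq_map_iff] at hm
    have hl2 := hm line hline
    simp only [Function.comp_apply] at hl2
    rw [pvToListA line hg, pvToListB line hg] at hl2
    exact hne hl2
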